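-- pv_equiv track=rewrite | github.com/x1xhlol/system-prompts-and-models-of-ai-tools | salesflow-saas/backend/scripts/full_stack_launch_test.py | _looks_like_no_server_running
-- ===== SOURCE A (Python) =====
-- def _looks_like_no_server_running(detail: str) -> bool:
--     d = (detail or "").lower()
--     needles = (
--         "connection attempts failed",
--         "connection refused",
--         "connecterror",
--         "errno 111",
--         "name or service not known",
--         "getaddrinfo failed",
--         "actively refused",
--         "no connection could be made",
--         "failed to establish",
--     )
--     return any(n in d for n in needles)
-- ===== SOURCE B (Python) =====
-- _NEEDLES = (
--     "connection attempts failed",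
--     "connection refused",
--     "connecterror",
--     "errno 111",
--     "name or service not known",
--     "getaddrinfo failed",
--     "actively refused",
--     "no connection could be made",
--     "failed to establish",
-- )
--
--
-- def _looks_like_no_server_running(detail: str) -> bool:
--     # Single left-to-right scan: at each position test whether any needle
--     # starts there, instead of one full 'in' scan per needle.
--     d = (detail or "").lower()
--     for i in range(len(d)):
--         for n in _NEEDLES:
--             if d.startswith(n, i):
--                 return True
--     return False
-- ===== Notes on version B (the rewrite author's own statement) =====
-- stated objective: alternative
-- what changed: Replaces the per-needle membership loop (one full substring scan per needle) with a single positional scan over the lowered string that tests each position once against all needles via startswith.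
import Mathlib
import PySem

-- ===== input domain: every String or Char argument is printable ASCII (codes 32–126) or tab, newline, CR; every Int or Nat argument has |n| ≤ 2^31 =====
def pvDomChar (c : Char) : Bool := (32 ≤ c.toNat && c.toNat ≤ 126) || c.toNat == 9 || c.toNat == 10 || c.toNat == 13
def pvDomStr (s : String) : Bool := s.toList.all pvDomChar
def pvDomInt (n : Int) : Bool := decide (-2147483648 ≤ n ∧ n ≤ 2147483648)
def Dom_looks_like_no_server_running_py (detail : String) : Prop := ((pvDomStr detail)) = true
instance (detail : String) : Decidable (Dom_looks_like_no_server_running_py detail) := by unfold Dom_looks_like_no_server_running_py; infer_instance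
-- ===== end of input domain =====

-- B replaces the per-needle membership loop with one positional scan of the lowered string (alternative decomposition, same cost).


-- ===== PORT A =====
-- the fixed tuple of needles from A
def pvNeedlesA : List String :=
  [ "connection attempts failed", "connection refused", "connecterror", "errno 111",
    "name or service not known", "getaddrinfo failed", "actively refused",
    "no connection could be made", "failed to establish" ]

-- (detail or "") is the identity on strings here: "" or "" yields ""
def looks_like_no_server_running_py (detail : String) : Bool :=
  let d := PySem.Str.lower detail
  pvNeedlesA.any (fun n => PySem.Str.isIn n d)

-- ===== PORT B =====
-- the same fixed needle list, as B's module constant, in char-list form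
def pvNeedlesB : List (List Char) := pvNeedlesA.map String.toList

-- the positional scan of Source B: at each position, does some needle start here?
def pvScanB : List Char → Bool
  | [] => false
  | c :: rest =>
      if pvNeedlesB.any (fun n => n.isPrefixOf (c :: rest)) then true
      else pvScanB rest

def looks_like_no_server_running_py_alt (detail : String) : Bool :=
  pvScanB (PySem.Chars.lower detail.toList)

-- ===== PRECONDITION & SPEC =====
def Spec_looks_like_no_server_running_py (detail : String) (out : Bool) : Prop := out = looks_like_no_server_running_py_alt detail
instance (detail : String) (out : Bool) : Decidable (Spec_looks_like_no_server_running_py detail out) := by unfold Spec_looks_like_no_server_running_py; infer_instance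

-- ===== CLAIM (what is proved, stated in full; the proofs are below) =====
def Claim_equal_looks_like_no_server_running_py : Prop := ∀ (detail : String), Dom_looks_like_no_server_running_py detail → Spec_looks_like_no_server_running_py detail (looks_like_no_server_running_py detail)

-- ===== LEMMAS AND PROOFS =====

-- every needle is nonempty
theorem pvNeedlesB_ne_nil : ∀ n ∈ pvNeedlesB, n ≠ [] := by decide

-- the scan finds exactly the inputs where some needle is a prefix of some suffix
theorem pvScanB_eq_true_iff (l : List Char) :
    pvScanB l = true ↔ ∃ n ∈ pvNeedlesB, ∃ j, n <+: l.drop j := by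
  induction l with
  | nil =>
      simp only [pvScanB, List.drop_nil]
      constructor
      · intro h; cases h
      · rintro ⟨n, hn, _, hpre⟩
        exact absurd (List.prefix_nil.mp hpre) (pvNeedlesB_ne_nil n hn)
  | cons c rest ih =>
      simp only [pvScanB]
      split
      · rename_i h
        simp only [true_iff]
        obtain ⟨n, hn, hpre⟩ := List.any_eq_true.mp h
        exact ⟨n, hn, 0, by simpa using List.isPrefixOf_iff_prefix.mp hpre⟩
      · rename_i h
        rw [ih]
        constructor
        · rintro ⟨n, hn, j, hpre⟩; exact ⟨n, hn, j + 1, by simpa using hpre⟩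
        · rintro ⟨n, hn, j, hpre⟩
          cases j with
          | zero =>
              exfalso
              exact h (List.any_eq_true.mpr ⟨n, hn, List.isPrefixOf_iff_prefix.mpr (by simpa using hpre)⟩)
          | succ k => exact ⟨n, hn, k, by simpa using hpre⟩

-- the scan agrees with per-needle substring membership
theorem pvScanB_eq_any (l : List Char) :
    pvScanB l = pvNeedlesB.any (fun n => PySem.Chars.isIn n l) := by
  rw [Bool.eq_iff_iff, pvScanB_eq_true_iff, List.any_eq_true]
  constructor
  · rintro ⟨n, hn, j, hpre⟩
    exact ⟨n, hn, (PySem.Chars.exists_prefix_drop_iff_isIn _ _).mp ⟨j, hpre⟩⟩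
  · rintro ⟨n, hn, hin⟩
    obtain ⟨j, hpre⟩ := (PySem.Chars.exists_prefix_drop_iff_isIn _ _).mpr hin
    exact ⟨n, hn, j, hpre⟩

-- ===== VERDICT (by name: the statement is the Claim_ definition above) =====
theorem looks_like_no_server_running_py_spec : Claim_equal_looks_like_no_server_running_py := by
  intro detail _
  unfold Spec_looks_like_no_server_running_py looks_like_no_server_running_py looks_like_no_server_running_py_alt
  rw [pvScanB_eq_any]
  simp [pvNeedlesB, List.any_map, PySem.Str.isIn, PySem.Str.lower, Function.comp_def]
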